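-- pv_equiv track=rewrite | github.com/neew18/python-projects | times_ten/times_ten.py | times_ten
-- ===== SOURCE A (Python) =====
-- def times_ten(start_index: int, end_index: int):
--     d = {}
--     value = []
--     key = []
--     i=j=start_index
--     for i in range(start_index, end_index+1):
--         value.append(i*10)
--
--     for j in range(start_index, end_index+1):
--         key.append(j)
--     for index in range(len(key)):
--         d[key[index]] = value[index]
--     return d
-- ===== SOURCE B (Python) =====
-- def times_ten(start_index: int, end_index: int):
--     pairs = []
--     i = end_index
--     while i >= start_index:
--         pairs.append((i, 10 * i))
--         i -= 1
--     return dict(reversed(pairs))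
-- ===== Notes on version B (the rewrite author's own statement) =====
-- stated objective: alternative
-- what changed: Replaces A's three staged passes (values list, keys list, index-join into the dict) with a single descending while-loop that builds the (key, value) pairs back-to-front and hands the reversed pair list to the dict constructor.
import Mathlib
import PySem

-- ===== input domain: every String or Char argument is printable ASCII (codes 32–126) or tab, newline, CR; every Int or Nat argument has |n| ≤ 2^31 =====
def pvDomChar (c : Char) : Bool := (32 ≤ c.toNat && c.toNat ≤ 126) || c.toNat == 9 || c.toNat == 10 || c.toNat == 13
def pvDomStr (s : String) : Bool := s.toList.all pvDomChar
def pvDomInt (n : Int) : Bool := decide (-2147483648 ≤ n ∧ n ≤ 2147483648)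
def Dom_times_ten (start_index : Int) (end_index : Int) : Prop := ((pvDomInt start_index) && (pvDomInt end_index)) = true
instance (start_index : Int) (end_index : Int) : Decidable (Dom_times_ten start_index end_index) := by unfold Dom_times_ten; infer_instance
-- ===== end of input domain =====

-- B builds the (key, value) pairs back-to-front with one descending while-loop and
-- hands the reversed pair list to the dict constructor, instead of A's three staged
-- passes (values list, keys list, index-join); same result, a different decomposition.

-- ===== PORT A =====
def times_ten (start_index : Int) (end_index : Int) : List (Int × Int) :=
  let value : List Int :=
    (PySem.List.pyRange start_index (end_index + 1) 1).foldl (fun acc i => acc ++ [i * 10]) []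
  let key : List Int :=
    (PySem.List.pyRange start_index (end_index + 1) 1).foldl (fun acc j => acc ++ [j]) []
  let d : PySem.Dict Int Int :=
    (PySem.List.pyRange 0 (PySem.List.len key) 1).foldl
      (fun d idx => d.insert (PySem.List.pyGetD key idx 0) (PySem.List.pyGetD value idx 0))
      PySem.Dict.empty
  d.items

-- ===== PORT B =====
-- the 'while i >= start_index' loop, descending from end_index, appending (i, 10*i)
def ttLoop (s : Int) (i : Int) (acc : List (Int × Int)) : List (Int × Int) :=
  if _h : s ≤ i then ttLoop s (i - 1) (acc ++ [(i, 10 * i)]) else acc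
termination_by (i + 1 - s).toNat
decreasing_by omega

def times_ten_alt (start_index : Int) (end_index : Int) : List (Int × Int) :=
  let pairs := ttLoop start_index end_index []
  -- dict(reversed(pairs)): insert each pair of the reversed list into an empty dict
  (pairs.reverse.foldl (fun (d : PySem.Dict Int Int) p => d.insert p.1 p.2)
    PySem.Dict.empty).items

-- ===== PRECONDITION & SPEC =====
def Spec_times_ten (start_index : Int) (end_index : Int) (out : List (Int × Int)) : Prop := out = times_ten_alt start_index end_index
instance (start_index : Int) (end_index : Int) (out : List (Int × Int)) : Decidable (Spec_times_ten start_index end_index out) := by unfold Spec_times_ten; infer_instance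

-- ===== CLAIM =====
def Claim_equal_times_ten : Prop := ∀ (start_index : Int) (end_index : Int), Dom_times_ten start_index end_index → Spec_times_ten start_index end_index (times_ten start_index end_index)

-- ===== LEMMAS AND PROOFS =====

-- the descending while-loop produces the reversed ascending pair list
theorem ttLoop_eq (s : Int) : ∀ (i : Int) (acc : List (Int × Int)),
    ttLoop s i acc
      = acc ++ ((PySem.List.pyRange s (i + 1) 1).map (fun v => (v, 10 * v))).reverse := by
  intro i
  induction hn : (i + 1 - s).toNat generalizing i with
  | zero =>
    intro acc
    rw [ttLoop]
    have hle : i < s := by omega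
    simp [not_le.2 hle, PySem.List.pyRange_one_eq_nil (by omega : i + 1 ≤ s)]
  | succ n ih =>
    intro acc
    rw [ttLoop]
    have hsi : s ≤ i := by omega
    rw [dif_pos hsi]
    rw [ih (i - 1) (by omega)]
    rw [PySem.List.pyRange_one_succ_right hsi]
    simp

theorem foldl_insert_ten_items (r : List Int) (h : r.Nodup) :
    ((r.foldl (fun (d : PySem.Dict Int Int) v => d.insert v (v * 10)) PySem.Dict.empty).items)
      = r.map (fun v => (v, v * 10)) := by
  have := PySem.Dict.items_foldl_insert_fresh (l := r) (k := id) (v := fun v => v * 10)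
      (d := (PySem.Dict.empty : PySem.Dict Int Int))
      (by intro a _; simp) (by simpa using h)
  simpa using this

-- A's three-pass build also yields the insertion of (v, v*10) for v along the range
theorem timesTen_eq_map (s e : Int) :
    times_ten s e = (PySem.List.pyRange s (e + 1) 1).map (fun v => (v, v * 10)) := by
  unfold times_ten
  set r := PySem.List.pyRange s (e + 1) 1 with hr
  have hval : r.foldl (fun acc i => acc ++ [i * 10]) [] = r.map (fun i => i * 10) := by
    simpa using PySem.List.foldl_append_singleton_eq_map (l := r) (f := fun i => i * 10) (acc := [])
  have hkey : r.foldl (fun acc j => acc ++ [j]) [] = r := by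
    simpa using PySem.List.foldl_append_singleton_eq_map (l := r) (f := fun j => j) (acc := [])
  simp only [hval, hkey]
  have hcong :
      (PySem.List.pyRange 0 (PySem.List.len r) 1).foldl
        (fun (d : PySem.Dict Int Int) idx =>
          d.insert (PySem.List.pyGetD r idx 0) (PySem.List.pyGetD (r.map (fun i => i * 10)) idx 0))
        PySem.Dict.empty
      = (PySem.List.pyRange 0 (PySem.List.len r) 1).foldl
        (fun (d : PySem.Dict Int Int) idx =>
          d.insert (PySem.List.pyGetD r idx 0) (PySem.List.pyGetD r idx 0 * 10))
        PySem.Dict.empty := by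
    apply PySem.List.foldl_congr_mem
    intro acc x hx
    rcases (PySem.List.mem_pyRange_one).1 hx with ⟨hx0, hxlt⟩
    have hxlt' : x < (r.length : Int) := by simpa [PySem.List.len_eq] using hxlt
    have h1 := PySem.List.pyGetD_eq_getElem (xs := r) (i := x) (d := 0)
      (by omega) (by simpa [PySem.List.len_eq] using hxlt')
    have h2 := PySem.List.pyGetD_eq_getElem (xs := r.map (fun i => i * 10)) (i := x) (d := 0)
      (by omega) (by simp; omega)
    simp [h1, h2]
  rw [hcong]
  rw [PySem.List.foldl_pyRange_zero_pyGetD r 0 (fun d v => d.insert v (v * 10)) PySem.Dict.empty]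
  exact foldl_insert_ten_items r (PySem.List.nodup_pyRange_one _ _)

-- ===== VERDICT =====
theorem times_ten_spec : Claim_equal_times_ten := by
  intro s e _
  show times_ten s e = times_ten_alt s e
  rw [timesTen_eq_map]
  unfold times_ten_alt
  rw [ttLoop_eq]
  simp only [List.nil_append, List.reverse_reverse, List.foldl_map]
  have := foldl_insert_ten_items (PySem.List.pyRange s (e + 1) 1)
    (PySem.List.nodup_pyRange_one _ _)
  simp only [mul_comm (10 : Int)] at this ⊢
  exact this.symm
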